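-- pv_equiv track=rewrite | github.com/Luqi8229/UCI-ICS | testWork.py | ReverseAndRemove
-- ===== SOURCE A (Python) =====
-- def ReverseAndRemove(s):
--
--     if s == "":
--         return s
--
--     c = s[0]
--     newS = s[1:]
--
--     newS = ReverseAndRemove(newS)
--     if c == " ":
--         return newS
--     else:
--
--         s = newS + c
--     return s
-- ===== SOURCE B (Python) =====
-- def ReverseAndRemove(s):
--     result = ""
--     for ch in s:
--         if ch != " ":
--             result = ch + result
--     return result
-- ===== Notes on version B (the rewrite author's own statement) =====
-- stated objective: simpler
-- what changed: Replaces the recursion-with-append by a single forward loop that prepends each non-space character to an accumulator, avoiding O(n) recursion depth and per-level string slicing.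
import Mathlib
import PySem

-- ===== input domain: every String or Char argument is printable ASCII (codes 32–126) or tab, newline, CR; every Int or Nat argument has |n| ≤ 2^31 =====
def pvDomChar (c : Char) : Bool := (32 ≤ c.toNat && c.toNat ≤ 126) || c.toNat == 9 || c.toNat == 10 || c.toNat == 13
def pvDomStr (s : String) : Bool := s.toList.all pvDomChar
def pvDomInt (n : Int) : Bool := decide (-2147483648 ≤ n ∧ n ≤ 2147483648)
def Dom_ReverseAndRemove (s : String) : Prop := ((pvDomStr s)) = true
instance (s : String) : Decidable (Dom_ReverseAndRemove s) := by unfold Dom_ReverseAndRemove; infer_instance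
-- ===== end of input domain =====

-- B replaces A's recursion-with-append by a single forward loop prepending non-space characters (simpler).

-- ===== PORT A =====
-- A recurses on s[1:] and appends s[0] after the recursive result unless it is a space.
def ReverseAndRemoveChars : List Char → List Char
  | [] => []
  | c :: rest =>
      let newS := ReverseAndRemoveChars rest
      if c = ' ' then newS else newS ++ [c]

def ReverseAndRemove (s : String) : String :=
  String.ofList (ReverseAndRemoveChars s.toList)

-- ===== PORT B =====
-- B: result = ""; for ch in s: if ch != " ": result = ch + result
def ReverseAndRemove_alt (s : String) : String :=
  String.ofList (s.toList.foldl (fun result ch => if ch ≠ ' ' then ch :: result else result) [])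

-- ===== PRECONDITION & SPEC =====
def Spec_ReverseAndRemove (s : String) (out : String) : Prop := out = ReverseAndRemove_alt s
instance (s : String) (out : String) : Decidable (Spec_ReverseAndRemove s out) := by unfold Spec_ReverseAndRemove; infer_instance

-- ===== CLAIM (what is proved, stated in full; the proofs are below) =====
def Claim_equal_ReverseAndRemove : Prop := ∀ (s : String), Dom_ReverseAndRemove s → Spec_ReverseAndRemove s (ReverseAndRemove s)

-- ===== LEMMAS AND PROOFS =====
theorem foldl_prepend_eq (l : List Char) (acc : List Char) :
    l.foldl (fun result ch => if ch ≠ ' ' then ch :: result else result) acc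
      = (l.filter (fun c => c ≠ ' ')).reverse ++ acc := by
  induction l generalizing acc with
  | nil => simp
  | cons c rest ih =>
      simp only [List.foldl_cons]
      rw [ih]
      by_cases h : c = ' ' <;> simp [h]

theorem charsA_eq_filter_reverse (l : List Char) :
    ReverseAndRemoveChars l = (l.filter (fun c => c ≠ ' ')).reverse := by
  induction l with
  | nil => rfl
  | cons c rest ih =>
      simp only [ReverseAndRemoveChars, List.filter_cons]
      by_cases h : c = ' '
      · simp [h, ih]
      · simp [h, ih]

-- ===== VERDICT (by name: the statement is the Claim_ definition above) =====
theorem ReverseAndRemove_spec : Claim_equal_ReverseAndRemove := by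
  intro s _
  unfold Spec_ReverseAndRemove ReverseAndRemove ReverseAndRemove_alt
  rw [charsA_eq_filter_reverse, foldl_prepend_eq, List.append_nil]
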